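-- pv_equiv track=rewrite | github.com/keatonkraiger/academic-website-generator | scripts/generate_people.py | distribute_rows
-- ===== SOURCE A (Python) =====
-- import math
--
-- def distribute_rows(items, max_per_row=5):
--     total = len(items)
--     if total <= max_per_row:
--         return [total]
--     factors = [i for i in range(2, min(max_per_row + 1, total + 1)) if total % i == 0]
--     if factors:
--         return [factors[-1]] * (total // factors[-1])
--     rows = math.ceil(total / max_per_row)
--     while rows <= total:
--         per_row = math.ceil(total / rows)
--         if per_row <= max_per_row:
--             result = [per_row] * (rows - 1)
--             remainder = total - (per_row * (rows - 1))
--             if remainder > 0: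
--                 result.append(remainder)
--             return result
--         rows += 1
-- ===== SOURCE B (Python) =====
-- import math
--
-- def distribute_rows(items, max_per_row=5):
--     total = len(items)
--     if total <= max_per_row:
--         return [total]
--     # Search row counts upward from the minimum feasible count: the first row
--     # count that divides total gives an even split (it is exactly the cofactor
--     # of the largest divisor of total in [2, max_per_row], since d -> total//d
--     # is order-reversing on divisors).
--     rows = math.ceil(total / max_per_row)
--     for r in range(rows, total // 2 + 1):
--         if total % r == 0:
--             return [total // r] * r
--     # No even split exists: minimal row count, with a shorter last row.
--     per_row = math.ceil(total / rows)
--     result = [per_row] * (rows - 1)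
--     remainder = total - per_row * (rows - 1)
--     if remainder > 0:
--         result.append(remainder)
--     return result
-- ===== Notes on version B (the rewrite author's own statement) =====
-- stated objective: alternative
-- what changed: B drops A's factor-list-over-divisors branch and while loop entirely: it scans candidate ROW COUNTS upward from ceil(total/max_per_row), returning an even split at the first row count dividing total (equivalent to A's largest-divisor choice because d -> total//d is an order-reversing bijection on divisors), and otherwise splits at the minimal row count with a remainder row computed in closed form.
import Mathlib
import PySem

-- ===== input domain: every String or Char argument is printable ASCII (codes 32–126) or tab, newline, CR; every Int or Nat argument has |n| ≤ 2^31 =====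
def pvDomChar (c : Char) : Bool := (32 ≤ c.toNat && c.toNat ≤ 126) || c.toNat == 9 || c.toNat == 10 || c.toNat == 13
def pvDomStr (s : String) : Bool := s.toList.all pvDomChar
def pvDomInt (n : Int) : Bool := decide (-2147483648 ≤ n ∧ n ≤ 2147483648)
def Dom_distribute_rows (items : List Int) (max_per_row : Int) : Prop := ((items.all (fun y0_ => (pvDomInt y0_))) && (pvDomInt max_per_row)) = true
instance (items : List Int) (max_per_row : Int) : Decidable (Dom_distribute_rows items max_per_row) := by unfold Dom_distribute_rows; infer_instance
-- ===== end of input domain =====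

-- B replaces A's divisor scan + while loop by a single upward scan over candidate ROW COUNTS
-- starting at ceil(total/max_per_row); objective: alternative algorithm, same result.

-- ===== PORT A =====
-- A's `while rows <= total` loop; the `else []` arm is Python's fall-through (returns None),
-- never reached inside Pre_.
def distRowsLoop (total max_per_row : Int) : Nat → Int → List Int
  | 0, _rows => []
  | fuel + 1, rows =>
    let per_row := -(PySem.Int.floordiv (-total) rows)
    if per_row ≤ max_per_row then
      let result := PySem.List.pyRepeat [per_row] (rows - 1)
      let remainder := total - per_row * (rows - 1)
      if remainder > 0 then result ++ [remainder] else result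
    else distRowsLoop total max_per_row fuel (rows + 1)

def distribute_rows (items : List Int) (max_per_row : Int) : List Int :=
  let total : Int := items.length
  if total ≤ max_per_row then [total]
  else
    let factors := (PySem.List.pyRange 2 (min (max_per_row + 1) (total + 1)) 1).filter
      (fun i => PySem.Int.mod total i == 0)
    if factors ≠ [] then
      let d := PySem.List.pyGetD factors (-1) 0
      PySem.List.pyRepeat [d] (PySem.Int.floordiv total d)
    else
      let rows := -(PySem.Int.floordiv (-total) max_per_row)
      distRowsLoop total max_per_row (total + 1 - rows).toNat rows

-- ===== PORT B =====
-- B's `for r in range(rows, total // 2 + 1)` loop, returning the first row count dividing total.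
def distRowsScan (total : Int) : Nat → Int → Option Int
  | 0, _r => none
  | fuel + 1, r =>
    if PySem.Int.mod total r == 0 then some r
    else distRowsScan total fuel (r + 1)

def distribute_rows_alt (items : List Int) (max_per_row : Int) : List Int :=
  let total : Int := items.length
  if total ≤ max_per_row then [total]
  else
    let rows := -(PySem.Int.floordiv (-total) max_per_row)
    match distRowsScan total (PySem.Int.floordiv total 2 + 1 - rows).toNat rows with
    | some r => PySem.List.pyRepeat [PySem.Int.floordiv total r] r
    | none =>
      let per_row := -(PySem.Int.floordiv (-total) rows)
      let result := PySem.List.pyRepeat [per_row] (rows - 1)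
      let remainder := total - per_row * (rows - 1)
      if remainder > 0 then result ++ [remainder] else result

-- ===== PRECONDITION & SPEC =====
-- Pre_ excludes exactly the inputs where A raises ZeroDivisionError: max_per_row = 0 (with
-- len(items) > 0), or max_per_row < 0 with 0 ≤ len(items) < -max_per_row (there
-- math.ceil(total / rows) divides by rows = 0).
def Pre_distribute_rows (items : List Int) (max_per_row : Int) : Prop :=
  (items.length : Int) ≤ max_per_row ∨ 0 < max_per_row ∨
    (max_per_row < 0 ∧ -max_per_row ≤ (items.length : Int))
instance (items : List Int) (max_per_row : Int) : Decidable (Pre_distribute_rows items max_per_row) := by unfold Pre_distribute_rows; infer_instance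

def pvWitness_distribute_rows : List Int × Int := ([1, 2, 3, 4, 5, 6, 7], 5)

def Spec_distribute_rows (items : List Int) (max_per_row : Int) (out : List Int) : Prop := out = distribute_rows_alt items max_per_row
instance (items : List Int) (max_per_row : Int) (out : List Int) : Decidable (Spec_distribute_rows items max_per_row out) := by unfold Spec_distribute_rows; infer_instance

-- ===== CLAIM =====
def Claim_equal_distribute_rows : Prop := ∀ (items : List Int) (max_per_row : Int), Dom_distribute_rows items max_per_row → Pre_distribute_rows items max_per_row → Spec_distribute_rows items max_per_row (distribute_rows items max_per_row)

-- ===== LEMMAS AND PROOFS =====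

-- last of A's upward factor list = first hit of a downward scan
lemma filter_getLast_eq_find (n mpr : Int) (h : mpr < n) (p : Int → Bool) :
    ((PySem.List.pyRange 2 (min (mpr + 1) (n + 1)) 1).filter p).getLast? =
      (PySem.List.pyRange mpr 1 (-1)).find? p := by
  rw [min_eq_left (by omega), PySem.List.pyRange_neg_one_eq_reverse,
    List.getLast?_eq_head?_reverse, ← List.filter_reverse]
  exact List.head?_filter

-- B's scan finds nothing iff no integer in [r, hi] divides n
theorem scan_none_iff (n hi : Int) : ∀ (fuel : Nat) (r : Int), fuel = (hi + 1 - r).toNat →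
    (distRowsScan n fuel r = none ↔ ∀ s : Int, r ≤ s → s ≤ hi → ¬ s ∣ n) := by
  intro fuel
  induction fuel with
  | zero =>
    intro r hf
    simp only [distRowsScan]
    constructor
    · intro _ s hrs hsh _; omega
    · intro _; trivial
  | succ f ih =>
    intro r hf
    have hrhi : r ≤ hi := by omega
    simp only [distRowsScan]
    by_cases hd : (PySem.Int.mod n r == 0) = true
    · rw [if_pos hd]
      simp only [beq_iff_eq, PySem.Int.mod_eq_zero_iff_dvd] at hd
      constructor
      · intro hsome; cases hsome
      · intro hall; exact absurd hd (hall r le_rfl hrhi)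
    · rw [if_neg hd, ih (r + 1) (by omega)]
      simp only [beq_iff_eq, PySem.Int.mod_eq_zero_iff_dvd] at hd
      constructor
      · intro h' s hrs hsh
        rcases eq_or_lt_of_le hrs with rfl | hlt
        · exact hd
        · exact h' s (by omega) hsh
      · intro hall s hs hsh; exact hall s (by omega) hsh

-- what B's scan returns: the LEAST divisor of n in [r, hi]
theorem scan_some (n hi : Int) : ∀ (fuel : Nat) (r r' : Int), fuel = (hi + 1 - r).toNat →
    distRowsScan n fuel r = some r' →
    r ≤ r' ∧ r' ≤ hi ∧ r' ∣ n ∧ ∀ s : Int, r ≤ s → s < r' → ¬ s ∣ n := by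
  intro fuel
  induction fuel with
  | zero => intro r r' _ h; cases h
  | succ f ih =>
    intro r r' hf h
    have hrhi : r ≤ hi := by omega
    simp only [distRowsScan] at h
    by_cases hd : (PySem.Int.mod n r == 0) = true
    · rw [if_pos hd] at h
      cases h
      simp only [beq_iff_eq, PySem.Int.mod_eq_zero_iff_dvd] at hd
      exact ⟨le_rfl, hrhi, hd, fun s h1 h2 _ => by omega⟩
    · rw [if_neg hd] at h
      obtain ⟨h1, h2, h3, h4⟩ := ih (r + 1) r' (by omega) h
      simp only [beq_iff_eq, PySem.Int.mod_eq_zero_iff_dvd] at hd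
      refine ⟨by omega, h2, h3, ?_⟩
      intro s hs hsr'
      rcases eq_or_lt_of_le hs with rfl | hlt
      · exact hd
      · exact h4 s (by omega) hsr'

-- the downward find? over [a..2] picks the GREATEST divisor of n in [2, a]
theorem find_down_some_iff (n a d : Int) :
    (PySem.List.pyRange a 1 (-1)).find? (fun e => PySem.Int.mod n e == 0) = some d ↔
      2 ≤ d ∧ d ≤ a ∧ d ∣ n ∧ ∀ e : Int, d < e → e ≤ a → ¬ e ∣ n := by
  by_cases h : 1 < a
  · rw [PySem.List.pyRange_neg_one_cons h]
    by_cases hd : ((fun e => PySem.Int.mod n e == 0) a) = true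
    · rw [List.find?_cons_of_pos (p := fun e => PySem.Int.mod n e == 0) hd]
      simp only [beq_iff_eq, PySem.Int.mod_eq_zero_iff_dvd] at hd
      constructor
      · intro h'
        have : d = a := by cases h'; rfl
        subst this
        exact ⟨by omega, le_rfl, hd, fun e he1 he2 _ => by omega⟩
      · rintro ⟨h2, hda, hdvd, hmax⟩
        have : d = a := by
          by_contra hne
          exact hmax a (lt_of_le_of_ne hda hne) le_rfl hd
        rw [this]
    · rw [List.find?_cons_of_neg (p := fun e => PySem.Int.mod n e == 0) hd, find_down_some_iff n (a - 1) d]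
      simp only [beq_iff_eq, PySem.Int.mod_eq_zero_iff_dvd] at hd
      constructor
      · rintro ⟨h2, hda, hdvd, hmax⟩
        refine ⟨h2, by omega, hdvd, ?_⟩
        intro e he1 he2
        rcases eq_or_lt_of_le he2 with rfl | hlt
        · exact hd
        · exact hmax e he1 (by omega)
      · rintro ⟨h2, hda, hdvd, hmax⟩
        have hdne : d ≠ a := by rintro rfl; exact hd hdvd
        exact ⟨h2, by omega, hdvd, fun e he1 he2 => hmax e he1 (by omega)⟩
  · rw [PySem.List.pyRange_neg_one_eq_nil (by omega)]
    simp only [List.find?_nil]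
    constructor
    · intro h'; cases h'
    · rintro ⟨h2, hda, _, _⟩; omega
termination_by (a - 1).toNat
decreasing_by omega

-- rows = ceil(n / mpr) satisfies A's loop guard, and its first per_row already passes the check
lemma loop_first_iteration (n mpr : Int) (hn : 0 ≤ n) (hlt : mpr < n)
    (hpre : 0 < mpr ∨ (mpr < 0 ∧ -mpr ≤ n)) :
    -(PySem.Int.floordiv (-n) mpr) ≤ n ∧
      -(PySem.Int.floordiv (-n) (-(PySem.Int.floordiv (-n) mpr))) ≤ mpr := by
  rcases hpre with hm | ⟨hm, hmn⟩
  · set r := -(PySem.Int.floordiv (-n) mpr) with hr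
    have hchar : (r - 1) * mpr < n ∧ n ≤ r * mpr :=
      (PySem.Int.neg_floordiv_neg_eq_iff_of_pos hm).mp rfl
    have hr1 : 1 ≤ r := by nlinarith [hchar.1, hchar.2]
    have hrn : r ≤ n := by nlinarith [hchar.1]
    refine ⟨hrn, ?_⟩
    have hrpos : 0 < r := by omega
    set p := -(PySem.Int.floordiv (-n) r) with hp
    have hchar2 : (p - 1) * r < n ∧ n ≤ p * r :=
      (PySem.Int.neg_floordiv_neg_eq_iff_of_pos hrpos).mp rfl
    nlinarith [hchar2.1, hchar.2]
  · have hflip : PySem.Int.floordiv (-n) mpr = PySem.Int.floordiv n (-mpr) := by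
      simpa using PySem.Int.floordiv_neg_neg n (-mpr)
    have hm0 : (0 : Int) < -mpr := by omega
    have hchar : (PySem.Int.floordiv n (-mpr)) * (-mpr) ≤ n ∧
        n < (PySem.Int.floordiv n (-mpr) + 1) * (-mpr) :=
      (PySem.Int.floordiv_eq_iff_of_pos hm0).mp rfl
    set q := PySem.Int.floordiv n (-mpr) with hq
    have hq1 : 1 ≤ q := by nlinarith [hchar.2]
    rw [hflip]
    refine ⟨by omega, ?_⟩
    have hflip2 : PySem.Int.floordiv (-n) (-q) = PySem.Int.floordiv n q := by
      simp [PySem.Int.floordiv_neg_neg n q]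
    rw [hflip2]
    have : -mpr ≤ PySem.Int.floordiv n q :=
      (PySem.Int.le_floordiv_iff_mul_le (by omega)).mpr (by nlinarith [hchar.1])
    omega

-- one unfolding of A's loop under the guard facts is exactly the closed form
lemma distRowsLoop_eq_closed (n mpr r : Int) (fuel : Nat) (h1 : fuel ≠ 0)
    (h2 : -(PySem.Int.floordiv (-n) r) ≤ mpr) :
    distRowsLoop n mpr fuel r =
      (let per_row := -(PySem.Int.floordiv (-n) r)
       let result := PySem.List.pyRepeat [per_row] (r - 1)
       let remainder := n - per_row * (r - 1)
       if remainder > 0 then result ++ [remainder] else result) := by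
  cases fuel with
  | zero => exact absurd rfl h1
  | succ f => simp only [distRowsLoop, if_pos h2]

-- ===== VERDICT =====
theorem distribute_rows_spec : Claim_equal_distribute_rows := by
  intro items mpr _ hpre
  unfold Spec_distribute_rows distribute_rows distribute_rows_alt
  set n : Int := (items.length : Int) with hn
  have hn0 : 0 ≤ n := by positivity
  by_cases hbase : n ≤ mpr
  · simp [hbase]
  · simp only [if_neg hbase]
    have hlt : mpr < n := by omega
    have hn1 : (1 : Int) ≤ n := by
      rcases hpre with h | h | h <;> omega
    have hkey := filter_getLast_eq_find n mpr hlt (fun i => PySem.Int.mod n i == 0)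
    rcases hpre with h | hm | ⟨hm, hmn⟩
    · omega
    · -- 0 < max_per_row
      set r0 := -(PySem.Int.floordiv (-n) mpr) with hr0
      have hch : (r0 - 1) * mpr < n ∧ n ≤ r0 * mpr :=
        (PySem.Int.neg_floordiv_neg_eq_iff_of_pos hm).mp rfl
      have hr01 : 1 ≤ r0 := by nlinarith [hch.1, hch.2]
      set hi := PySem.Int.floordiv n 2 with hhi
      have hih : hi * 2 ≤ n ∧ n < (hi + 1) * 2 :=
        (PySem.Int.floordiv_eq_iff_of_pos (by norm_num)).mp rfl
      cases hscan : distRowsScan n ((hi + 1 - r0).toNat) r0 with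
      | some r' =>
        obtain ⟨hs1, hs2, hs3, hs4⟩ := scan_some n hi ((hi + 1 - r0).toNat) r0 r' rfl hscan
        have hr'pos : (0 : Int) < r' := by omega
        obtain ⟨d, hdprod⟩ := hs3
        have hd2 : 2 ≤ d := by
          by_contra h'; push_neg at h'
          nlinarith [hih.1, mul_nonneg (show (0:Int) ≤ 1 - d by omega) (show (0:Int) ≤ r' by omega)]
        have hdm : d ≤ mpr := by
          by_contra h'; push_neg at h'
          nlinarith [hch.2, mul_nonneg (show (0:Int) ≤ d - mpr - 1 by omega) (show (0:Int) ≤ r' by omega),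
            mul_nonneg (show (0:Int) ≤ r' - r0 by omega) (show (0:Int) ≤ mpr by omega)]
        have hmax : ∀ e : Int, d < e → e ≤ mpr → ¬ e ∣ n := by
          rintro e he1 he2 ⟨s, hsprod⟩
          have hs0 : 1 ≤ s := by
            by_contra h'; push_neg at h'
            nlinarith [mul_nonneg (show (0:Int) ≤ e by omega) (show (0:Int) ≤ -s by omega)]
          have hsr0 : r0 ≤ s := by
            by_contra h'; push_neg at h'
            nlinarith [hch.1, mul_nonneg (show (0:Int) ≤ mpr - e by omega) (show (0:Int) ≤ s by omega),
              mul_nonneg (show (0:Int) ≤ r0 - 1 - s by omega) (show (0:Int) ≤ mpr by omega)]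
          have hsr' : s < r' := by
            by_contra h'; push_neg at h'
            nlinarith [mul_nonneg (show (0:Int) ≤ s - r' by omega) (show (0:Int) ≤ e by omega),
              mul_nonneg (show (0:Int) ≤ e - d - 1 by omega) (show (0:Int) ≤ r' by omega)]
          exact hs4 s hsr0 hsr' ⟨e, by rw [hsprod, mul_comm]⟩
        have hfind : (PySem.List.pyRange mpr 1 (-1)).find? (fun e => PySem.Int.mod n e == 0) = some d :=
          (find_down_some_iff n mpr d).mpr ⟨hd2, hdm, ⟨r', by rw [hdprod, mul_comm]⟩, hmax⟩
        rw [hfind] at hkey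
        have hne : (PySem.List.pyRange 2 (min (mpr + 1) (n + 1)) 1).filter
            (fun i => PySem.Int.mod n i == 0) ≠ [] := by
          intro hnil; rw [hnil] at hkey; simp at hkey
        rw [List.getLast?_eq_some_getLast hne] at hkey
        simp only [if_pos hne, PySem.List.pyGetD_neg_one _ _ hne, Option.some.injEq] at hkey ⊢
        rw [hkey]
        have hfd : PySem.Int.floordiv n d = r' :=
          (PySem.Int.floordiv_eq_iff_of_pos (by omega)).mpr ⟨by nlinarith, by nlinarith⟩
        have hfr : PySem.Int.floordiv n r' = d :=
          (PySem.Int.floordiv_eq_iff_of_pos (by omega)).mpr ⟨by nlinarith, by nlinarith⟩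
        rw [hfd, hfr]
      | none =>
        have hnone := (scan_none_iff n hi ((hi + 1 - r0).toNat) r0 rfl).mp hscan
        have hfnone : (PySem.List.pyRange mpr 1 (-1)).find? (fun e => PySem.Int.mod n e == 0) = none := by
          rw [List.find?_eq_none]
          intro x hx
          rw [PySem.List.mem_pyRange_neg_one] at hx
          simp only [beq_iff_eq, PySem.Int.mod_eq_zero_iff_dvd]
          rintro ⟨s, hsprod⟩
          have hs0 : 1 ≤ s := by
            by_contra h'; push_neg at h'
            nlinarith [mul_nonneg (show (0:Int) ≤ x by omega) (show (0:Int) ≤ -s by omega)]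
          have hsr0 : r0 ≤ s := by
            by_contra h'; push_neg at h'
            nlinarith [hch.1, mul_nonneg (show (0:Int) ≤ mpr - x by omega) (show (0:Int) ≤ s by omega),
              mul_nonneg (show (0:Int) ≤ r0 - 1 - s by omega) (show (0:Int) ≤ mpr by omega)]
          have hshi : s ≤ hi := by
            refine (PySem.Int.le_floordiv_iff_mul_le (by norm_num)).mpr ?_
            nlinarith [mul_nonneg (show (0:Int) ≤ x - 2 by omega) (show (0:Int) ≤ s by omega)]
          exact hnone s hsr0 hshi ⟨x, by rw [hsprod, mul_comm]⟩
        rw [hfnone] at hkey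
        have hfilnil : (PySem.List.pyRange 2 (min (mpr + 1) (n + 1)) 1).filter
            (fun i => PySem.Int.mod n i == 0) = [] := by
          rwa [List.getLast?_eq_none_iff] at hkey
        simp only [hfilnil, ne_eq, not_true_eq_false, if_false]
        obtain ⟨h1, h2⟩ := loop_first_iteration n mpr hn0 hlt (Or.inl hm)
        rw [← hr0] at h1 h2
        exact distRowsLoop_eq_closed n mpr r0 ((n + 1 - r0).toNat) (by omega) h2
    · -- max_per_row < 0 (with -max_per_row ≤ n): both sides return []
      rw [← hn] at hmn
      set r0 := -(PySem.Int.floordiv (-n) mpr) with hr0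
      set hi := PySem.Int.floordiv n 2 with hhi
      have hflip : PySem.Int.floordiv (-n) mpr = PySem.Int.floordiv n (-mpr) := by
        simpa using PySem.Int.floordiv_neg_neg n (-mpr)
      set m := PySem.Int.floordiv n (-mpr) with hmdef
      have hr0m : r0 = -m := by rw [hr0, hflip]
      have hcm : m * (-mpr) ≤ n ∧ n < (m + 1) * (-mpr) :=
        (PySem.Int.floordiv_eq_iff_of_pos (by omega)).mp rfl
      have hm1 : 1 ≤ m := by nlinarith [hcm.2, hmn]
      have hrange : PySem.List.pyRange 2 (min (mpr + 1) (n + 1)) 1 = [] := by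
        rw [min_eq_left (by omega)]
        exact PySem.List.pyRange_one_eq_nil (by omega)
      simp only [hrange, List.filter_nil, ne_eq, not_true_eq_false, if_false]
      obtain ⟨h1, h2⟩ := loop_first_iteration n mpr hn0 hlt (Or.inr ⟨hm, hmn⟩)
      rw [← hr0] at h1 h2
      have h1' : r0 ≤ n := h1
      rw [distRowsLoop_eq_closed n mpr r0 ((n + 1 - r0).toNat) (by omega) h2]
      have hhi0 : (0 : Int) ≤ hi :=
        (PySem.Int.le_floordiv_iff_mul_le (by norm_num)).mpr (by omega)
      cases hscan : distRowsScan n ((hi + 1 - r0).toNat) r0 with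
      | none =>
        exact (((scan_none_iff n hi ((hi + 1 - r0).toNat) r0 rfl).mp hscan (-1) (by omega) (by omega)) ⟨-n, by ring⟩).elim
      | some r' =>
        obtain ⟨hs1, hs2, hs3, hs4⟩ := scan_some n hi ((hi + 1 - r0).toNat) r0 r' rfl hscan
        have hr'neg : r' ≤ -1 := by
          by_contra h'; push_neg at h'
          exact hs4 (-1) (by omega) (by omega) ⟨-n, by ring⟩
        have hflip2 : PySem.Int.floordiv (-n) r0 = PySem.Int.floordiv n m := by
          rw [hr0m]; simpa using PySem.Int.floordiv_neg_neg n m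
        set q := PySem.Int.floordiv n m with hqdef
        have hcq : q * m ≤ n ∧ n < (q + 1) * m :=
          (PySem.Int.floordiv_eq_iff_of_pos (by omega)).mp rfl
        have hqk : -mpr ≤ q :=
          (PySem.Int.le_floordiv_iff_mul_le (by omega)).mpr (by nlinarith [hcm.1])
        have hrem : ¬ (n - (-(PySem.Int.floordiv (-n) r0)) * (r0 - 1) > 0) := by
          rw [hflip2, hr0m]
          push_neg
          nlinarith [hcm.2, hqk, mul_nonneg (show (0:Int) ≤ q + mpr by omega) (show (0:Int) ≤ m by omega)]
        have hrep : PySem.List.pyRepeat [-(PySem.Int.floordiv (-n) r0)] (r0 - 1) = [] := by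
          rw [PySem.List.pyRepeat_singleton, Int.toNat_of_nonpos (by omega)]; rfl
        have hB : PySem.List.pyRepeat [PySem.Int.floordiv n r'] r' = [] := by
          rw [PySem.List.pyRepeat_singleton, Int.toNat_of_nonpos (by omega)]; rfl
        simp only [if_neg hrem, hrep, hB]
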